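-- pv_equiv track=rewrite | github.com/Mavreekee/Python | Homework 5/task4.py | random_data2
-- ===== SOURCE A (Python) =====
-- def random_data2(array):
--     a_count = 0
--     b_count = 0
--     c_count = 0
--     d_count = 0
--     for i in range(len(array)):
--         if array[i] == 'a':
--             a_count = a_count + 1
--         elif array[i] == 'b':
--             b_count = b_count + 1
--         elif array[i] == 'c':
--             c_count = c_count + 1
--         else:
--             d_count = d_count + 1
--     array = [f'{a_count}a{b_count}b{c_count}c{d_count}d']
--     return array
-- ===== SOURCE B (Python) =====
-- def random_data2(array):
--     a_count = array.count('a')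
--     b_count = array.count('b')
--     c_count = array.count('c')
--     d_count = len(array) - a_count - b_count - c_count
--     return [f'{a_count}a{b_count}b{c_count}c{d_count}d']
-- ===== Notes on version B (the rewrite author's own statement) =====
-- stated objective: idiomatic
-- what changed: Replaces the explicit index loop with a 4-way if-elif chain by three list.count calls and computes the 'other' tally by subtraction from len(array).
import Mathlib
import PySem

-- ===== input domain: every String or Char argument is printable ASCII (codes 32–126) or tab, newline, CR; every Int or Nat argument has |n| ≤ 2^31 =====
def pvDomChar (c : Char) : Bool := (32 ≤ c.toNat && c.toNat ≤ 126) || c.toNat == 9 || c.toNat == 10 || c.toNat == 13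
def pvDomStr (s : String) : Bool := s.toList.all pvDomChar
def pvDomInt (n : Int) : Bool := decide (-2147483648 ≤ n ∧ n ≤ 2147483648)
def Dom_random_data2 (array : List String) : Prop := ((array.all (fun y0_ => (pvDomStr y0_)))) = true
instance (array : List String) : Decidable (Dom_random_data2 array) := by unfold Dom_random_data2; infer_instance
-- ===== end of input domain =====

-- B replaces A's explicit index loop (4-way if-elif tally) by three list.count passes
-- plus 'd' computed by subtraction from the length; objective: idiomatic, same cost.


-- ===== PORT A =====
-- for i in range(len(array)): if array[i]=='a': …  elif 'b' … elif 'c' … else d+=1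
def random_data2 (array : List String) : List String :=
  let counts :=
    (PySem.List.pyRange 0 (array.length : Int) 1).foldl
      (fun (s : Int × Int × Int × Int) i =>
        let x := PySem.List.pyGetD array i ""   -- index always in range in this loop
        if x == "a" then (s.1 + 1, s.2.1, s.2.2.1, s.2.2.2)
        else if x == "b" then (s.1, s.2.1 + 1, s.2.2.1, s.2.2.2)
        else if x == "c" then (s.1, s.2.1, s.2.2.1 + 1, s.2.2.2)
        else (s.1, s.2.1, s.2.2.1, s.2.2.2 + 1))
      (0, 0, 0, 0)
  [PySem.Int.toStr counts.1 ++ "a" ++ PySem.Int.toStr counts.2.1 ++ "b" ++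
   PySem.Int.toStr counts.2.2.1 ++ "c" ++ PySem.Int.toStr counts.2.2.2 ++ "d"]

-- ===== PORT B =====
def random_data2_alt (array : List String) : List String :=
  let a_count : Int := PySem.List.count array "a"
  let b_count : Int := PySem.List.count array "b"
  let c_count : Int := PySem.List.count array "c"
  let d_count : Int := (array.length : Int) - a_count - b_count - c_count
  [PySem.Int.toStr a_count ++ "a" ++ PySem.Int.toStr b_count ++ "b" ++
   PySem.Int.toStr c_count ++ "c" ++ PySem.Int.toStr d_count ++ "d"]

-- ===== PRECONDITION & SPEC =====
def Spec_random_data2 (array : List String) (out : List String) : Prop := out = random_data2_alt array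
instance (array : List String) (out : List String) : Decidable (Spec_random_data2 array out) := by unfold Spec_random_data2; infer_instance

-- ===== CLAIM (what is proved, stated in full; the proofs are below) =====
def Claim_equal_random_data2 : Prop := ∀ (array : List String), Dom_random_data2 array → Spec_random_data2 array (random_data2 array)

-- ===== LEMMAS AND PROOFS =====

-- A fold over range(len(xs)) reading xs[i] is a fold over xs itself.
theorem pv_idx_foldl {σ : Type} (f : σ → String → σ) (xs : List String) (init : σ) :
    (List.range xs.length).foldl (fun (s : σ) (k : Nat) => f s (PySem.List.pyGetD xs (k : Int) "")) init
      = xs.foldl f init := by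
  induction xs using List.reverseRecOn generalizing init with
  | nil => simp
  | append_singleton ys y ih =>
    simp only [List.length_append, List.length_singleton, List.range_succ,
      List.foldl_append, List.foldl_cons, List.foldl_nil]
    have hmid : ∀ (s : σ) (k : Nat), k ∈ List.range ys.length →
        f s (PySem.List.pyGetD (ys ++ [y]) (k : Int) "") = f s (PySem.List.pyGetD ys (k : Int) "") := by
      intro s k hk
      have hk' : k < ys.length := List.mem_range.mp hk
      rw [PySem.List.pyGetD_natCast, PySem.List.pyGetD_natCast]
      congr 1
      exact List.getD_append _ _ _ _ hk'
    rw [PySem.List.foldl_congr_mem (h := hmid), ih]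
    congr 1
    rw [PySem.List.pyGetD_natCast]
    simp

-- The counting fold computes the three counts and the leftover tally.
theorem pv_count_loop (xs : List String) (a b c d : Int) :
    xs.foldl
      (fun (s : Int × Int × Int × Int) x =>
        if x == "a" then (s.1 + 1, s.2.1, s.2.2.1, s.2.2.2)
        else if x == "b" then (s.1, s.2.1 + 1, s.2.2.1, s.2.2.2)
        else if x == "c" then (s.1, s.2.1, s.2.2.1 + 1, s.2.2.2)
        else (s.1, s.2.1, s.2.2.1, s.2.2.2 + 1)) (a, b, c, d)
      = (a + xs.count "a", b + xs.count "b", c + xs.count "c",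
         d + ((xs.length : Int) - xs.count "a" - xs.count "b" - xs.count "c")) := by
  induction xs generalizing a b c d with
  | nil => simp
  | cons x t ih =>
    simp only [beq_iff_eq] at ih
    simp only [List.foldl_cons, beq_iff_eq]
    split_ifs with h1 h2 h3
    · subst h1; rw [ih]; simp; omega
    · subst h2; rw [ih]; simp; omega
    · subst h3; rw [ih]; simp; omega
    · rw [ih]; simp [h1, h2, h3]; all_goals omega

-- ===== VERDICT (by name: the statement is the Claim_ definition above) =====
theorem random_data2_spec : Claim_equal_random_data2 := by
  intro array _
  show random_data2 array = random_data2_alt array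
  unfold random_data2 random_data2_alt
  simp only [PySem.List.pyRange_one, Int.sub_zero, Int.toNat_natCast, List.foldl_map,
    Int.zero_add, PySem.List.count_eq]
  rw [pv_idx_foldl (f := fun (s : Int × Int × Int × Int) x =>
        if x == "a" then (s.1 + 1, s.2.1, s.2.2.1, s.2.2.2)
        else if x == "b" then (s.1, s.2.1 + 1, s.2.2.1, s.2.2.2)
        else if x == "c" then (s.1, s.2.1, s.2.2.1 + 1, s.2.2.2)
        else (s.1, s.2.1, s.2.2.1, s.2.2.2 + 1))]
  rw [pv_count_loop]
  simp
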